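-- pv_equiv track=rewrite | github.com/axu-bioinfo/qbb2020-answers | week4_hw/week4_answer3.py | mafft_nuc
-- ===== SOURCE A (Python) =====
-- def mafft_nuc(mafft_dic, prot_nuc_dic):
-- 	mafft_nuc_dic = {}
-- 	for prot_id in mafft_dic:
-- 		mafft_nuc = ""
-- 		prot_seq_index = 0
-- 		for alignment in mafft_dic[prot_id][1]:
-- 			if alignment == "-":
-- 				mafft_nuc = mafft_nuc + "---"
-- 			else:
-- 				mafft_nuc = mafft_nuc + prot_nuc_dic[prot_id][prot_seq_index][1]
-- 				if prot_seq_index + 1 < len(prot_nuc_dic[prot_id]) and prot_nuc_dic[prot_id][prot_seq_index + 1][0] == "*":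
-- 					prot_seq_index = prot_seq_index + 1
-- 				prot_seq_index = prot_seq_index + 1
-- 		mafft_nuc_dic[mafft_dic[prot_id][0]] = mafft_nuc
-- 	return(mafft_nuc_dic)
-- ===== SOURCE B (Python) =====
-- def _codons(entries):
--     # codons consumable under the stop-skip rule: consume entry i, then skip
--     # the next entry when its amino acid is '*' (only immediately after a consume)
--     out = []
--     i = 0
--     n = len(entries)
--     while i < n:
--         out.append(entries[i][1])
--         i += 2 if (i + 1 < n and entries[i + 1][0] == "*") else 1
--     return out
--
-- def mafft_nuc(mafft_dic, prot_nuc_dic):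
--     result = {}
--     for prot_id, (name, aln) in mafft_dic.items():
--         cods = iter(_codons(prot_nuc_dic.get(prot_id, [])))
--         result[name] = "".join("---" if c == "-" else next(cods) for c in aln)
--     return result
-- ===== Notes on version B (the rewrite author's own statement) =====
-- stated objective: alternative
-- what changed: Instead of A's single pass that interleaves stop-skip index bookkeeping with repeated string concatenation, B precomputes per protein the list of consumable codons under the stop-skip rule and then expands the alignment in one pass, joining the pieces at the end.
import Mathlib
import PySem

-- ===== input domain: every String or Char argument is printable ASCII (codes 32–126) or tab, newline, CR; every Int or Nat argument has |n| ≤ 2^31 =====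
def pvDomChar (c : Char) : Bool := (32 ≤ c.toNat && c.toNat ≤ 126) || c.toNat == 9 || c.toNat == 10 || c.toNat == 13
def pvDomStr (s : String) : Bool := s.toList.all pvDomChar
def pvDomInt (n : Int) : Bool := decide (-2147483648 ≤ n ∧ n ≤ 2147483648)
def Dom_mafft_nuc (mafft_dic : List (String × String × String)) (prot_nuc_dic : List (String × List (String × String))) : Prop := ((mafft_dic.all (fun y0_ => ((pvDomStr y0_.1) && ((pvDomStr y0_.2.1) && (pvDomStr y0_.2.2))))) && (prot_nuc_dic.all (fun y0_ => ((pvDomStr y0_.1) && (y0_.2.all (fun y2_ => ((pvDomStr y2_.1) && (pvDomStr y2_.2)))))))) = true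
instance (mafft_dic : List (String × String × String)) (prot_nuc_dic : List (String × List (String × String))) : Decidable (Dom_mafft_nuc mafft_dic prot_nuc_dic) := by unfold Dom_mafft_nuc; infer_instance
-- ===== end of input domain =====

-- B replaces A's per-character index bookkeeping and string += by a per-protein
-- precomputation of the consumable codon list followed by a single expand-and-join
-- pass over the alignment (objective: alternative decomposition; return value only).

-- ===== PORT A =====
-- A's inner loop: state = (accumulated nucleotide string, prot_seq_index);
-- the raising lookups prot_nuc_dic[prot_id] / entries[i] are total via getD, exact inside Pre_.
def mafft_nuc (mafft_dic : List (String × String × String)) (prot_nuc_dic : List (String × List (String × String))) : List (String × String) :=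
  let md := PySem.Dict.ofList mafft_dic
  let pd := PySem.Dict.ofList prot_nuc_dic
  (md.items.foldl (fun acc kv =>
      let st := kv.2.2.toList.foldl (fun (s : String × Nat) c =>
        if c = '-' then (s.1 ++ "---", s.2)
        else (s.1 ++ ((pd.getD kv.1 []).getD s.2 ("", "")).2,
          (if s.2 + 1 < (pd.getD kv.1 []).length ∧ ((pd.getD kv.1 []).getD (s.2 + 1) ("", "")).1 = "*"
           then s.2 + 1 else s.2) + 1)) ("", 0)
      acc.insert kv.2.1 st.1) PySem.Dict.empty).items

-- ===== PORT B =====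
-- codons consumable under the stop-skip rule (Source B's _codons, as suffix recursion)
def pvCodons : List (String × String) → List String
  | [] => []
  | [e] => [e.2]
  | e :: f :: rest => e.2 :: (if f.1 = "*" then pvCodons rest else pvCodons (f :: rest))

-- Source B's join-generator: '---' for a gap, else the next precomputed codon
def pvExpand : List Char → List String → List String
  | [], _ => []
  | c :: cs, cods =>
      if c = '-' then "---" :: pvExpand cs cods
      else cods.headD "" :: pvExpand cs cods.tail

def mafft_nuc_alt (mafft_dic : List (String × String × String)) (prot_nuc_dic : List (String × List (String × String))) : List (String × String) :=
  let md := PySem.Dict.ofList mafft_dic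
  let pd := PySem.Dict.ofList prot_nuc_dic
  (md.items.foldl (fun acc kv =>
      acc.insert kv.2.1 (PySem.Str.join "" (pvExpand kv.2.2.toList (pvCodons (pd.getD kv.1 []))))) PySem.Dict.empty).items

-- ===== PRECONDITION & SPEC =====
-- Pre_ excludes exactly the inputs on which A raises: for some protein the aligned
-- (non-gap) residues outnumber the codons consumable under the stop-skip rule
-- (IndexError), including a missing prot_nuc key with at least one residue (KeyError).
def Pre_mafft_nuc (mafft_dic : List (String × String × String)) (prot_nuc_dic : List (String × List (String × String))) : Prop :=
  ∀ kv ∈ (PySem.Dict.ofList mafft_dic).items,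
    (kv.2.2.toList.filter (fun c => c ≠ '-')).length
      ≤ (pvCodons ((PySem.Dict.ofList prot_nuc_dic).getD kv.1 [])).length
instance (mafft_dic : List (String × String × String)) (prot_nuc_dic : List (String × List (String × String))) : Decidable (Pre_mafft_nuc mafft_dic prot_nuc_dic) := by unfold Pre_mafft_nuc; infer_instance

def pvWitness_mafft_nuc : (List (String × String × String)) × (List (String × List (String × String))) :=
  ([("p", ("n", "AB-C")), ("q", ("m", "--"))],
   [("p", [("A", "GCT"), ("*", "TAA"), ("B", "AAA"), ("C", "CCC")])])

def Spec_mafft_nuc (mafft_dic : List (String × String × String)) (prot_nuc_dic : List (String × List (String × String))) (out : List (String × String)) : Prop := out = mafft_nuc_alt mafft_dic prot_nuc_dic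
instance (mafft_dic : List (String × String × String)) (prot_nuc_dic : List (String × List (String × String))) (out : List (String × String)) : Decidable (Spec_mafft_nuc mafft_dic prot_nuc_dic out) := by unfold Spec_mafft_nuc; infer_instance

-- ===== CLAIM (what is proved, stated in full; the proofs are below) =====
def Claim_equal_mafft_nuc : Prop := ∀ (mafft_dic : List (String × String × String)) (prot_nuc_dic : List (String × List (String × String))), Dom_mafft_nuc mafft_dic prot_nuc_dic → Pre_mafft_nuc mafft_dic prot_nuc_dic → Spec_mafft_nuc mafft_dic prot_nuc_dic (mafft_nuc mafft_dic prot_nuc_dic)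

-- ===== LEMMAS AND PROOFS =====

theorem pv_join_empty_cons (x : String) (l : List String) :
    PySem.Str.join "" (x :: l) = x ++ PySem.Str.join "" l := by
  apply String.toList_inj.mp
  cases l with
  | nil => simp [PySem.Str.toList_join, PySem.Chars.join_singleton, PySem.Chars.join_nil]
  | cons y ys => simp [PySem.Str.toList_join, PySem.Chars.join_cons_cons]

-- one step of the stop-skip walk, seen on the codon list of a suffix
theorem pvCodons_drop (entries : List (String × String)) (i : Nat) (h : i < entries.length) :
    pvCodons (entries.drop i) =
      (entries.getD i ("", "")).2 ::
        pvCodons (entries.drop (if i + 1 < entries.length ∧ (entries.getD (i + 1) ("", "")).1 = "*" then i + 2 else i + 1)) := by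
  by_cases h1 : i + 1 < entries.length
  · rw [List.drop_eq_getElem_cons h, List.drop_eq_getElem_cons h1]
    simp only [List.getD_eq_getElem _ _ h, List.getD_eq_getElem _ _ h1, h1, true_and]
    by_cases hs : entries[i+1].1 = "*"
    · simp [pvCodons, hs]
    · simp [pvCodons, hs, ← List.drop_eq_getElem_cons h1]
  · have hlen : entries.length = i + 1 := by omega
    rw [List.drop_eq_getElem_cons h]
    have : entries.drop (i+1) = [] := by simp [hlen]
    simp [this, pvCodons, hlen]

-- A's inner index-walk fold equals B's expand-and-join of the precomputed codons
theorem pv_inner (entries : List (String × String)) :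
    ∀ (cs : List Char) (i : Nat) (acc : String),
      (cs.filter (fun c => c ≠ '-')).length ≤ (pvCodons (entries.drop i)).length →
      (cs.foldl (fun (s : String × Nat) c =>
        if c = '-' then (s.1 ++ "---", s.2)
        else (s.1 ++ (entries.getD s.2 ("", "")).2,
          (if s.2 + 1 < entries.length ∧ (entries.getD (s.2 + 1) ("", "")).1 = "*" then s.2 + 1 else s.2) + 1)) (acc, i)).1
      = acc ++ PySem.Str.join "" (pvExpand cs (pvCodons (entries.drop i))) := by
  intro cs
  induction cs with
  | nil =>
    intro i acc _
    have : PySem.Str.join "" ([] : List String) = "" := by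
      apply String.toList_inj.mp; simp [PySem.Str.toList_join, PySem.Chars.join_nil]
    simp [pvExpand, this]
  | cons c cs ih =>
    intro i acc hle
    by_cases hc : c = '-'
    · subst hc
      simp only [List.foldl_cons, pvExpand, if_true]
      rw [ih i (acc ++ "---") (by simpa using hle)]
      rw [pv_join_empty_cons]
      simp [String.append_assoc]
    · have hle' : (cs.filter (fun c => c ≠ '-')).length + 1 ≤ (pvCodons (entries.drop i)).length := by
        simp only [List.filter_cons] at hle
        rw [if_pos (by simpa using hc)] at hle
        simpa using hle
      have hi : i < entries.length := by
        by_contra hni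
        have hdn : entries.drop i = [] := List.drop_eq_nil_of_le (by omega)
        rw [hdn] at hle'; simp [pvCodons] at hle'
      have hdrop := pvCodons_drop entries i hi
      simp only [List.foldl_cons, if_neg hc, pvExpand]
      rw [hdrop]
      simp only [List.headD_cons, List.tail_cons]
      have hnext : (if i + 1 < entries.length ∧ (entries.getD (i + 1) ("", "")).1 = "*" then i + 1 else i) + 1
          = (if i + 1 < entries.length ∧ (entries.getD (i + 1) ("", "")).1 = "*" then i + 2 else i + 1) := by
        split_ifs <;> rfl
      rw [hnext]
      rw [ih _ (acc ++ (entries.getD i ("", "")).2) (by rw [hdrop] at hle'; simpa using hle')]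
      rw [pv_join_empty_cons]
      simp [String.append_assoc]

theorem pv_foldl_eq_of_agree {α β : Type} (l : List α) (f g : β → α → β)
    (h : ∀ a ∈ l, ∀ b, f b a = g b a) : ∀ b, l.foldl f b = l.foldl g b := by
  induction l with
  | nil => intro b; rfl
  | cons a l ih =>
    intro b
    rw [List.foldl_cons, List.foldl_cons, h a (by simp)]
    exact ih (fun a ha b => h a (by simp [ha]) b) _

-- ===== VERDICT (by name: the statement is the Claim_ definition above) =====
theorem mafft_nuc_spec : Claim_equal_mafft_nuc := by
  intro mafft_dic prot_nuc_dic _ hpre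
  unfold Spec_mafft_nuc mafft_nuc mafft_nuc_alt
  dsimp only
  congr 1
  apply pv_foldl_eq_of_agree
  intro kv hmem acc
  congr 1
  have h := pv_inner ((PySem.Dict.ofList prot_nuc_dic).getD kv.1 []) kv.2.2.toList 0 ""
    (by simpa using hpre kv hmem)
  simpa using h
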